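-- pv_equiv track=rewrite | github.com/varuntej25/agentic_siem | master_agent.py | _generate_evidence_prompts
-- ===== SOURCE A (Python) =====
-- from typing import Dict, List, Any
--
-- def _generate_evidence_prompts(included_agents: List[str], current_alert: Dict,
--                              user_prompt: str, signals: Dict) -> Dict[str, str]:
--     """Generate targeted prompts based on evidence"""
--     prompts = {}
--     alert_context = f"Alert: {current_alert.get('alertName', 'Unknown')} (Severity: {current_alert.get('severity', 'Unknown')})"
--
--     for agent in included_agents:
--         if agent == 'user_context':
--             entities = f" Focus on entities: {', '.join(signals['user_entities'])}" if signals['user_entities'] else ""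
--             prompts[agent] = f"{alert_context}. Analyze user behavior, authentication patterns, and account activities.{entities} Task: {user_prompt}"
--
--         elif agent == 'ip_agent':
--             entities = f" Focus on IPs: {', '.join(signals['ip_entities'])}" if signals['ip_entities'] else ""
--             prompts[agent] = f"{alert_context}. Investigate network behavior, IP connections, and traffic patterns.{entities} Task: {user_prompt}"
--
--         elif agent == 'timeline':
--             prompts[agent] = f"{alert_context}. Sort and analyze events chronologically from calling agents. Task: {user_prompt}"
--
--         elif agent == 'alert_history':
--             prompts[agent] = f"{alert_context}. Find historical patterns and similar incidents. Task: {user_prompt}"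
--
--         elif agent == 'summary':
--             prompts[agent] = f"{alert_context}. Compile findings from all agents and provide threat assessment. Task: {user_prompt}"
--
--     return prompts
-- ===== SOURCE B (Python) =====
-- # B: three staged passes — (1) dedup included agents to the handled ones in
-- # first-occurrence order, (2) precompute the two optional focus clauses once,
-- # (3) assemble all prompts with one dict comprehension over the dedup'd list.
--
-- _KNOWN = ('user_context', 'ip_agent', 'timeline', 'alert_history', 'summary')
--
--
-- def _generate_evidence_prompts(included_agents, current_alert, user_prompt, signals):
--     alert_context = f"Alert: {current_alert.get('alertName', 'Unknown')} (Severity: {current_alert.get('severity', 'Unknown')})"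
--     # stage 1: distinct handled agents, first-occurrence order
--     seen = []
--     for agent in included_agents:
--         if agent in _KNOWN and agent not in seen:
--             seen.append(agent)
--     # stage 2: focus clauses (signals is only touched for agents actually requested)
--     uc = ipc = ""
--     if 'user_context' in seen:
--         vals = signals['user_entities']
--         if vals:
--             uc = " Focus on entities: " + ", ".join(vals)
--     if 'ip_agent' in seen:
--         vals = signals['ip_entities']
--         if vals:
--             ipc = " Focus on IPs: " + ", ".join(vals)
--     clause = {'user_context': uc, 'ip_agent': ipc}
--     desc = {
--         'user_context': "Analyze user behavior, authentication patterns, and account activities.",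
--         'ip_agent': "Investigate network behavior, IP connections, and traffic patterns.",
--         'timeline': "Sort and analyze events chronologically from calling agents.",
--         'alert_history': "Find historical patterns and similar incidents.",
--         'summary': "Compile findings from all agents and provide threat assessment.",
--     }
--     # stage 3: assemble
--     return {a: f"{alert_context}. {desc[a]}{clause.get(a, '')} Task: {user_prompt}" for a in seen}
-- ===== Notes on version B (the rewrite author's own statement) =====
-- stated objective: alternative
-- what changed: Replaced A's single loop with a five-way elif chain by three staged passes: dedup included agents to the handled ones in first-occurrence order, precompute the two optional focus clauses once into a small clause dict, then assemble every prompt with one dict comprehension over the deduplicated list.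
import Mathlib
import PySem

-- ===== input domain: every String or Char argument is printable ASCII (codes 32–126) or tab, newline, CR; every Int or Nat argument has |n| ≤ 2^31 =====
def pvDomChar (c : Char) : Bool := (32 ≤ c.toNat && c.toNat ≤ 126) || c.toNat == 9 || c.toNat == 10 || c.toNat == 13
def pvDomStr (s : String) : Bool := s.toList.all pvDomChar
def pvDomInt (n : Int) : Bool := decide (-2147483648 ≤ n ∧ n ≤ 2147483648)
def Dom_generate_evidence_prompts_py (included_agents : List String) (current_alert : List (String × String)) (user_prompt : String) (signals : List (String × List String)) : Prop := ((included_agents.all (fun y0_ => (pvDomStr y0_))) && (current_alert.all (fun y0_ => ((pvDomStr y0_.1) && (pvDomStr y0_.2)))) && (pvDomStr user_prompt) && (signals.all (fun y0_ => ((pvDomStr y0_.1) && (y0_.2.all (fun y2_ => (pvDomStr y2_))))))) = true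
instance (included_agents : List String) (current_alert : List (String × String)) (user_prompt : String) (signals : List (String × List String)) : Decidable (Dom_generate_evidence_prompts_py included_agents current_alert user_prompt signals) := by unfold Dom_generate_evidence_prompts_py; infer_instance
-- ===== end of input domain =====

-- B restructures A's single branchy loop into three staged passes (dedup, clause precomputation, assembly); same cost.

-- ===== PORT A =====
-- A-side helper: the alert_context f-string
def pvAlertCtxA (current_alert : List (String × String)) : String :=
  "Alert: " ++ (PySem.Dict.mk current_alert).getD "alertName" "Unknown" ++
  " (Severity: " ++ (PySem.Dict.mk current_alert).getD "severity" "Unknown" ++ ")"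

def generate_evidence_prompts_py (included_agents : List String) (current_alert : List (String × String)) (user_prompt : String) (signals : List (String × List String)) : List (String × String) :=
  let alert_context := pvAlertCtxA current_alert
  (included_agents.foldl (fun prompts agent =>
    if agent == "user_context" then
      let ue := (PySem.Dict.mk signals).getD "user_entities" []
      let entities := if ue ≠ [] then " Focus on entities: " ++ PySem.Str.join ", " ue else ""
      prompts.insert agent (alert_context ++ ". Analyze user behavior, authentication patterns, and account activities." ++ entities ++ " Task: " ++ user_prompt)
    else if agent == "ip_agent" then
      let ie := (PySem.Dict.mk signals).getD "ip_entities" []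
      let entities := if ie ≠ [] then " Focus on IPs: " ++ PySem.Str.join ", " ie else ""
      prompts.insert agent (alert_context ++ ". Investigate network behavior, IP connections, and traffic patterns." ++ entities ++ " Task: " ++ user_prompt)
    else if agent == "timeline" then
      prompts.insert agent (alert_context ++ ". Sort and analyze events chronologically from calling agents. Task: " ++ user_prompt)
    else if agent == "alert_history" then
      prompts.insert agent (alert_context ++ ". Find historical patterns and similar incidents. Task: " ++ user_prompt)
    else if agent == "summary" then
      prompts.insert agent (alert_context ++ ". Compile findings from all agents and provide threat assessment. Task: " ++ user_prompt)
    else prompts) PySem.Dict.empty).items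

-- ===== PORT B =====
-- B-side helpers: the tuple of handled agent names and the alert_context f-string
def pvKnown : List String := ["user_context", "ip_agent", "timeline", "alert_history", "summary"]

def pvAlertCtxB (current_alert : List (String × String)) : String :=
  "Alert: " ++ (PySem.Dict.mk current_alert).getD "alertName" "Unknown" ++
  " (Severity: " ++ (PySem.Dict.mk current_alert).getD "severity" "Unknown" ++ ")"

-- stage-1 step: 'if agent in _KNOWN and agent not in seen: seen.append(agent)'
def pvSeenStep (s : List String) (agent : String) : List String :=
  if pvKnown.contains agent && !(s.contains agent) then s ++ [agent] else s

def generate_evidence_prompts_py_alt (included_agents : List String) (current_alert : List (String × String)) (user_prompt : String) (signals : List (String × List String)) : List (String × String) :=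
  let alert_context := pvAlertCtxB current_alert
  -- stage 1: distinct handled agents, first-occurrence order
  let seen := included_agents.foldl pvSeenStep []
  -- stage 2: focus clauses
  let uc := if seen.contains "user_context" then
      let vals := (PySem.Dict.mk signals).getD "user_entities" []
      if vals ≠ [] then " Focus on entities: " ++ PySem.Str.join ", " vals else ""
    else ""
  let ipc := if seen.contains "ip_agent" then
      let vals := (PySem.Dict.mk signals).getD "ip_entities" []
      if vals ≠ [] then " Focus on IPs: " ++ PySem.Str.join ", " vals else ""
    else ""
  let clause := PySem.Dict.mk [("user_context", uc), ("ip_agent", ipc)]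
  let desc := PySem.Dict.mk
    [("user_context", "Analyze user behavior, authentication patterns, and account activities."),
     ("ip_agent", "Investigate network behavior, IP connections, and traffic patterns."),
     ("timeline", "Sort and analyze events chronologically from calling agents."),
     ("alert_history", "Find historical patterns and similar incidents."),
     ("summary", "Compile findings from all agents and provide threat assessment.")]
  -- stage 3: assemble (desc[a] ported as getD: every a ∈ seen is a key of desc, so the KeyError branch is unreachable)
  (seen.foldl (fun d a =>
    d.insert a (alert_context ++ ". " ++ desc.getD a "" ++ clause.getD a "" ++ " Task: " ++ user_prompt))
    PySem.Dict.empty).items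

-- ===== PRECONDITION & SPEC =====
-- Pre_ excludes exactly the inputs on which the Python A raises KeyError: 'user_context'
-- (resp. 'ip_agent') listed among the agents while 'user_entities' (resp. 'ip_entities')
-- is not a key of signals.  (B raises a KeyError there too.)
def Pre_generate_evidence_prompts_py (included_agents : List String) (current_alert : List (String × String)) (user_prompt : String) (signals : List (String × List String)) : Prop :=
  ("user_context" ∈ included_agents → "user_entities" ∈ signals.map Prod.fst) ∧
  ("ip_agent" ∈ included_agents → "ip_entities" ∈ signals.map Prod.fst)
instance (included_agents : List String) (current_alert : List (String × String)) (user_prompt : String) (signals : List (String × List String)) : Decidable (Pre_generate_evidence_prompts_py included_agents current_alert user_prompt signals) := by unfold Pre_generate_evidence_prompts_py; infer_instance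

def pvWitness_generate_evidence_prompts_py : List String × (List (String × String)) × String × (List (String × List String)) :=
  (["user_context", "timeline"], [("alertName", "Brute force")], "investigate", [("user_entities", ["alice"])])

def Spec_generate_evidence_prompts_py (included_agents : List String) (current_alert : List (String × String)) (user_prompt : String) (signals : List (String × List String)) (out : List (String × String)) : Prop := out = generate_evidence_prompts_py_alt included_agents current_alert user_prompt signals
instance (included_agents : List String) (current_alert : List (String × String)) (user_prompt : String) (signals : List (String × List String)) (out : List (String × String)) : Decidable (Spec_generate_evidence_prompts_py included_agents current_alert user_prompt signals out) := by unfold Spec_generate_evidence_prompts_py; infer_instance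

-- ===== CLAIM (what is proved, stated in full; the proofs are below) =====
def Claim_equal_generate_evidence_prompts_py : Prop := ∀ (included_agents : List String) (current_alert : List (String × String)) (user_prompt : String) (signals : List (String × List String)), Dom_generate_evidence_prompts_py included_agents current_alert user_prompt signals → Pre_generate_evidence_prompts_py included_agents current_alert user_prompt signals → Spec_generate_evidence_prompts_py included_agents current_alert user_prompt signals (generate_evidence_prompts_py included_agents current_alert user_prompt signals)

-- ===== LEMMAS AND PROOFS =====

-- A's loop body as a named function (definitionally the lambda in the A port)
def pvStepA (current_alert : List (String × String)) (user_prompt : String) (signals : List (String × List String)) :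
    PySem.Dict String String → String → PySem.Dict String String := fun prompts agent =>
  if agent == "user_context" then
    let ue := (PySem.Dict.mk signals).getD "user_entities" []
    let entities := if ue ≠ [] then " Focus on entities: " ++ PySem.Str.join ", " ue else ""
    prompts.insert agent (pvAlertCtxA current_alert ++ ". Analyze user behavior, authentication patterns, and account activities." ++ entities ++ " Task: " ++ user_prompt)
  else if agent == "ip_agent" then
    let ie := (PySem.Dict.mk signals).getD "ip_entities" []
    let entities := if ie ≠ [] then " Focus on IPs: " ++ PySem.Str.join ", " ie else ""
    prompts.insert agent (pvAlertCtxA current_alert ++ ". Investigate network behavior, IP connections, and traffic patterns." ++ entities ++ " Task: " ++ user_prompt)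
  else if agent == "timeline" then
    prompts.insert agent (pvAlertCtxA current_alert ++ ". Sort and analyze events chronologically from calling agents. Task: " ++ user_prompt)
  else if agent == "alert_history" then
    prompts.insert agent (pvAlertCtxA current_alert ++ ". Find historical patterns and similar incidents. Task: " ++ user_prompt)
  else if agent == "summary" then
    prompts.insert agent (pvAlertCtxA current_alert ++ ". Compile findings from all agents and provide threat assessment. Task: " ++ user_prompt)
  else prompts

-- the value A stores for a handled agent (proof-side characterisation of A's branches)
def pvVA (current_alert : List (String × String)) (user_prompt : String) (signals : List (String × List String)) (agent : String) : String :=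
  let ctx := pvAlertCtxA current_alert
  if agent == "user_context" then
    let ue := (PySem.Dict.mk signals).getD "user_entities" []
    let entities := if ue ≠ [] then " Focus on entities: " ++ PySem.Str.join ", " ue else ""
    ctx ++ ". Analyze user behavior, authentication patterns, and account activities." ++ entities ++ " Task: " ++ user_prompt
  else if agent == "ip_agent" then
    let ie := (PySem.Dict.mk signals).getD "ip_entities" []
    let entities := if ie ≠ [] then " Focus on IPs: " ++ PySem.Str.join ", " ie else ""
    ctx ++ ". Investigate network behavior, IP connections, and traffic patterns." ++ entities ++ " Task: " ++ user_prompt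
  else if agent == "timeline" then
    ctx ++ ". Sort and analyze events chronologically from calling agents. Task: " ++ user_prompt
  else if agent == "alert_history" then
    ctx ++ ". Find historical patterns and similar incidents. Task: " ++ user_prompt
  else if agent == "summary" then
    ctx ++ ". Compile findings from all agents and provide threat assessment. Task: " ++ user_prompt
  else ""

-- B's clause and description dicts and assembled value as named functions (definitionally B's lets)
def pvClauseDict (signals : List (String × List String)) (seen : List String) : PySem.Dict String String :=
  PySem.Dict.mk
    [("user_context", (if seen.contains "user_context" then
        let vals := (PySem.Dict.mk signals).getD "user_entities" []
        if vals ≠ [] then " Focus on entities: " ++ PySem.Str.join ", " vals else ""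
      else "")),
     ("ip_agent", (if seen.contains "ip_agent" then
        let vals := (PySem.Dict.mk signals).getD "ip_entities" []
        if vals ≠ [] then " Focus on IPs: " ++ PySem.Str.join ", " vals else ""
      else ""))]

def pvDescDict : PySem.Dict String String :=
  PySem.Dict.mk
    [("user_context", "Analyze user behavior, authentication patterns, and account activities."),
     ("ip_agent", "Investigate network behavior, IP connections, and traffic patterns."),
     ("timeline", "Sort and analyze events chronologically from calling agents."),
     ("alert_history", "Find historical patterns and similar incidents."),
     ("summary", "Compile findings from all agents and provide threat assessment.")]

def pvWB (current_alert : List (String × String)) (user_prompt : String) (signals : List (String × List String))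
    (seen : List String) (a : String) : String :=
  pvAlertCtxB current_alert ++ ". " ++ pvDescDict.getD a "" ++ (pvClauseDict signals seen).getD a "" ++ " Task: " ++ user_prompt

-- A's loop body, rewritten as 'insert the key-determined value if the agent is handled'
theorem pv_stepA_eq (current_alert : List (String × String)) (user_prompt : String) (signals : List (String × List String)) :
    pvStepA current_alert user_prompt signals =
      fun prompts agent => if pvKnown.contains agent then prompts.insert agent (pvVA current_alert user_prompt signals agent) else prompts := by
  funext prompts agent
  unfold pvStepA
  by_cases h1 : agent = "user_context"
  · subst h1; rfl
  by_cases h2 : agent = "ip_agent"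
  · subst h2; rfl
  by_cases h3 : agent = "timeline"
  · subst h3; rfl
  by_cases h4 : agent = "alert_history"
  · subst h4; rfl
  by_cases h5 : agent = "summary"
  · subst h5; rfl
  · have hm : agent ∉ pvKnown := by simp [pvKnown, h1, h2, h3, h4, h5]
    simp [h1, h2, h3, h4, h5, hm]

-- the canonical A-fold over any prefix state 'Dict.mk (seen.map …)' tracks B's stage-1 dedup fold
theorem pv_fold_main (current_alert : List (String × String)) (user_prompt : String) (signals : List (String × List String)) :
    ∀ (included : List String) (seen : List String),
      included.foldl (fun d a => if pvKnown.contains a then d.insert a (pvVA current_alert user_prompt signals a) else d)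
        (PySem.Dict.mk (seen.map (fun a => (a, pvVA current_alert user_prompt signals a))))
      = PySem.Dict.mk ((included.foldl pvSeenStep seen).map (fun a => (a, pvVA current_alert user_prompt signals a))) := by
  intro included
  induction included with
  | nil => intro seen; rfl
  | cons x xs ih =>
    intro seen
    simp only [List.foldl_cons]
    by_cases hk : pvKnown.contains x = true
    · have hkm : x ∈ pvKnown := by simpa using hk
      by_cases hs : x ∈ seen
      · have hstep : pvSeenStep seen x = seen := by
          simp [pvSeenStep, hkm, hs]
        have hins : (PySem.Dict.mk (seen.map (fun a => (a, pvVA current_alert user_prompt signals a)))).insert x (pvVA current_alert user_prompt signals x)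
            = PySem.Dict.mk (seen.map (fun a => (a, pvVA current_alert user_prompt signals a))) := by
          have hcont : (PySem.Dict.mk (seen.map (fun a => (a, pvVA current_alert user_prompt signals a)))).contains x = true := by
            rw [PySem.Dict.contains_iff_mem_keys]
            simp [PySem.Dict.keys_mk, hs]
          apply PySem.Dict.ext
          rw [PySem.Dict.items_insert_of_contains _ _ hcont]
          show (seen.map (fun a => (a, pvVA current_alert user_prompt signals a))).map _ = _
          rw [List.map_map]
          apply List.map_congr_left
          intro a _
          by_cases hax : a = x
          · subst hax; simp [Function.comp]
          · simp [Function.comp, hax]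
        rw [if_pos hk, hins, hstep, ih]
      · have hstep : pvSeenStep seen x = seen ++ [x] := by
          simp [pvSeenStep, hkm, hs]
        have hcont : (PySem.Dict.mk (seen.map (fun a => (a, pvVA current_alert user_prompt signals a)))).contains x = false := by
          rw [← Bool.not_eq_true, PySem.Dict.contains_iff_mem_keys]
          simp [PySem.Dict.keys_mk, hs]
        have hins : (PySem.Dict.mk (seen.map (fun a => (a, pvVA current_alert user_prompt signals a)))).insert x (pvVA current_alert user_prompt signals x)
            = PySem.Dict.mk ((seen ++ [x]).map (fun a => (a, pvVA current_alert user_prompt signals a))) := by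
          apply PySem.Dict.ext
          rw [PySem.Dict.items_insert_of_not_contains _ _ hcont]
          simp
        rw [if_pos hk, hins, hstep, ih]
    · have hkm : x ∉ pvKnown := by simpa using hk
      have hstep : pvSeenStep seen x = seen := by simp [pvSeenStep, hkm]
      rw [if_neg hk, hstep, ih]

-- the dedup fold keeps its accumulator duplicate-free and only adds handled agents
theorem pv_seen_nodup : ∀ (l s : List String), s.Nodup → (l.foldl pvSeenStep s).Nodup := by
  intro l
  induction l with
  | nil => intro s hs; exact hs
  | cons x xs ih =>
    intro s hs
    simp only [List.foldl_cons]
    apply ih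
    unfold pvSeenStep
    split_ifs with h
    · have hx : x ∉ s := by
        intro hmem
        simp [hmem] at h
      exact hs.append (List.nodup_singleton x) (List.disjoint_singleton.mpr hx)
    · exact hs

theorem pv_seen_mem : ∀ (l s : List String) (a : String), a ∈ l.foldl pvSeenStep s → a ∈ s ∨ a ∈ pvKnown := by
  intro l
  induction l with
  | nil => intro s a h; exact Or.inl h
  | cons x xs ih =>
    intro s a h
    rcases ih _ _ h with h2 | h2
    · unfold pvSeenStep at h2
      split_ifs at h2 with hg
      · rcases List.mem_append.mp h2 with h3 | h3
        · exact Or.inl h3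
        · right
          have hx : x ∈ pvKnown := by
            have := hg
            simp only [Bool.and_eq_true] at this
            simpa using this.1
          simpa [List.mem_singleton.mp h3] using hx
      · exact Or.inl h2
    · exact Or.inr h2

-- on every agent the dedup pass keeps, A's branch value equals B's assembled value
theorem pv_value_eq (current_alert : List (String × String)) (user_prompt : String) (signals : List (String × List String))
    (seen : List String) (a : String) (ha : a ∈ seen) (hk : a ∈ pvKnown) :
    pvVA current_alert user_prompt signals a = pvWB current_alert user_prompt signals seen a := by
  have hctx : pvAlertCtxA current_alert = pvAlertCtxB current_alert := rfl
  fin_cases hk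
  · -- user_context
    have hc : seen.contains "user_context" = true := by simpa using ha
    simp only [pvVA, pvWB, pvDescDict, pvClauseDict, hctx, String.reduceBEq, beq_self_eq_true, reduceIte,
      PySem.Dict.getD_eq_get?_getD, PySem.Dict.get?_mk_cons, hc]
    apply String.toList_injective
    by_cases h : (PySem.Dict.mk signals).getD "user_entities" [] = [] <;> simp [h, String.toList_append]
  · -- ip_agent
    have hc : seen.contains "ip_agent" = true := by simpa using ha
    simp only [pvVA, pvWB, pvDescDict, pvClauseDict, hctx, String.reduceBEq, beq_self_eq_true, reduceIte,
      PySem.Dict.getD_eq_get?_getD, PySem.Dict.get?_mk_cons, hc]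
    apply String.toList_injective
    by_cases h : (PySem.Dict.mk signals).getD "ip_entities" [] = [] <;> simp [h, String.toList_append]
  · -- timeline
    apply String.toList_injective
    simp [pvVA, pvWB, pvDescDict, pvClauseDict, hctx, PySem.Dict.getD_eq_get?_getD,
      PySem.Dict.get?_mk_cons, PySem.Dict.get?, String.toList_append]
  · -- alert_history
    apply String.toList_injective
    simp [pvVA, pvWB, pvDescDict, pvClauseDict, hctx, PySem.Dict.getD_eq_get?_getD,
      PySem.Dict.get?_mk_cons, PySem.Dict.get?, String.toList_append]
  · -- summary
    apply String.toList_injective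
    simp [pvVA, pvWB, pvDescDict, pvClauseDict, hctx, PySem.Dict.getD_eq_get?_getD,
      PySem.Dict.get?_mk_cons, PySem.Dict.get?, String.toList_append]

-- ===== VERDICT (by name: the statement is the Claim_ definition above) =====
theorem generate_evidence_prompts_py_spec : Claim_equal_generate_evidence_prompts_py := by
  intro included_agents current_alert user_prompt signals _ _
  unfold Spec_generate_evidence_prompts_py
  have eA : generate_evidence_prompts_py included_agents current_alert user_prompt signals
      = (included_agents.foldl (pvStepA current_alert user_prompt signals) (PySem.Dict.mk [])).items := rfl
  have eB : generate_evidence_prompts_py_alt included_agents current_alert user_prompt signals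
      = ((included_agents.foldl pvSeenStep []).foldl
          (fun d a => d.insert a (pvWB current_alert user_prompt signals (included_agents.foldl pvSeenStep []) a))
          (PySem.Dict.mk [])).items := rfl
  rw [eA, eB, pv_stepA_eq]
  have hA := pv_fold_main current_alert user_prompt signals included_agents []
  simp only [List.map_nil] at hA
  rw [hA]
  set seen := included_agents.foldl pvSeenStep [] with hseen
  have hnd : seen.Nodup := pv_seen_nodup included_agents [] List.nodup_nil
  rw [PySem.Dict.items_foldl_insert_fresh seen (fun a => a)
        (pvWB current_alert user_prompt signals seen) (PySem.Dict.mk [])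
        (fun a _ => PySem.Dict.contains_empty a) (by simpa using hnd)]
  show seen.map (fun a => (a, pvVA current_alert user_prompt signals a)) = [] ++ _
  rw [List.nil_append]
  apply List.map_congr_left
  intro a ha
  have hk : a ∈ pvKnown := by
    rcases pv_seen_mem included_agents [] a (by simpa [hseen] using ha) with h | h
    · cases h
    · exact h
  exact congrArg (fun v => ((a : String), v)) (pv_value_eq current_alert user_prompt signals seen a ha hk)
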